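-- pv_equiv track=rewrite | github.com/timainge/iobox | src/iobox/modes.py | get_google_scopes
-- ===== SOURCE A (Python) =====
-- GMAIL_SCOPES_READONLY: list[str] = ["https://www.googleapis.com/auth/gmail.readonly"]
--
-- GMAIL_SCOPES_STANDARD: list[str] = [
--     "https://www.googleapis.com/auth/gmail.modify",
--     "https://www.googleapis.com/auth/gmail.compose",
-- ]
--
-- CALENDAR_SCOPES_READONLY: list[str] = ["https://www.googleapis.com/auth/calendar.readonly"]
--
-- CALENDAR_SCOPES_STANDARD: list[str] = ["https://www.googleapis.com/auth/calendar"]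
--
-- DRIVE_SCOPES_READONLY: list[str] = ["https://www.googleapis.com/auth/drive.readonly"]
--
-- DRIVE_SCOPES_STANDARD: list[str] = ["https://www.googleapis.com/auth/drive"]
--
-- def get_google_scopes(services: list[str], mode: str) -> list[str]:
--     """Build combined Google OAuth scope list for the given services and mode.
--
--     Args:
--         services: Subset of ``["messages", "calendar", "drive"]``.
--         mode: ``"readonly"`` or ``"standard"`` (dangerous treated as standard).
--
--     Returns:
--         Deduplicated list of OAuth scope strings suitable for passing to
--         ``InstalledAppFlow`` or ``GoogleAuth``.
--     """
--     scopes: list[str] = []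
--     if "messages" in services:
--         if mode == "readonly":
--             scopes.extend(GMAIL_SCOPES_READONLY)
--         else:
--             scopes.extend(GMAIL_SCOPES_STANDARD)
--     if "calendar" in services:
--         if mode == "readonly":
--             scopes.extend(CALENDAR_SCOPES_READONLY)
--         else:
--             scopes.extend(CALENDAR_SCOPES_STANDARD)
--     if "drive" in services:
--         if mode == "readonly":
--             scopes.extend(DRIVE_SCOPES_READONLY)
--         else:
--             scopes.extend(DRIVE_SCOPES_STANDARD)
--     # Preserve order, remove exact duplicates.
--     seen: set[str] = set()
--     result: list[str] = []
--     for s in scopes: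
--         if s not in seen:
--             seen.add(s)
--             result.append(s)
--     return result
-- ===== SOURCE B (Python) =====
-- # Closed-form enumeration: only 16 possible answers exist (3 presence bits x 2 modes),
-- # and no scope string repeats across services, so every answer can be precomputed
-- # literally and returned by a single indexed lookup -- no building loop, no dedup pass.
--
-- _GR = "https://www.googleapis.com/auth/gmail.readonly"
-- _GM = "https://www.googleapis.com/auth/gmail.modify"
-- _GC = "https://www.googleapis.com/auth/gmail.compose"
-- _CR = "https://www.googleapis.com/auth/calendar.readonly"
-- _CS = "https://www.googleapis.com/auth/calendar"
-- _DR = "https://www.googleapis.com/auth/drive.readonly"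
-- _DS = "https://www.googleapis.com/auth/drive"
--
-- # index = 4*messages + 2*calendar + drive
-- _READONLY_ANSWERS = (
--     [], [_DR], [_CR], [_CR, _DR],
--     [_GR], [_GR, _DR], [_GR, _CR], [_GR, _CR, _DR],
-- )
-- _STANDARD_ANSWERS = (
--     [], [_DS], [_CS], [_CS, _DS],
--     [_GM, _GC], [_GM, _GC, _DS], [_GM, _GC, _CS], [_GM, _GC, _CS, _DS],
-- )
--
-- def get_google_scopes(services, mode):
--     idx = 4 * ("messages" in services) + 2 * ("calendar" in services) + ("drive" in services)
--     table = _READONLY_ANSWERS if mode == "readonly" else _STANDARD_ANSWERS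
--     return list(table[idx])
-- ===== Notes on version B (the rewrite author's own statement) =====
-- stated objective: alternative
-- what changed: Replaces A's conditional scope accumulation plus seen-set dedup loop with a closed-form lookup: all 16 possible answers (3 service-presence bits x 2 modes) are precomputed as literal lists and B returns one by a single computed index, with no building loop and no dedup pass (correct because no scope string repeats across services).
import Mathlib
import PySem

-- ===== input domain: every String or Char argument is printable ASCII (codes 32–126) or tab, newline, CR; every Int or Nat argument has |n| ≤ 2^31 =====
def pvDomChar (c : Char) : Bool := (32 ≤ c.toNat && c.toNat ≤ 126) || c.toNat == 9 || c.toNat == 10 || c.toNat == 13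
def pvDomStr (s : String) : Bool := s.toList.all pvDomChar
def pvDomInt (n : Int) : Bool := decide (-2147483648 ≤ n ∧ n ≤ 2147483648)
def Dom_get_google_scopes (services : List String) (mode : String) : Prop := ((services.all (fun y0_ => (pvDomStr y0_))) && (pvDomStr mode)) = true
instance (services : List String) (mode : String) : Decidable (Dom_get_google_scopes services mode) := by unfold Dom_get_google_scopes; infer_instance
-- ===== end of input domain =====

-- B replaces A's conditional accumulation + seen-set dedup with a closed-form lookup into a precomputed table of all 16 possible answers (alternative; same cost).


-- ===== PORT A =====
def GMAIL_SCOPES_READONLY : List String := ["https://www.googleapis.com/auth/gmail.readonly"]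
def GMAIL_SCOPES_STANDARD : List String :=
  ["https://www.googleapis.com/auth/gmail.modify", "https://www.googleapis.com/auth/gmail.compose"]
def CALENDAR_SCOPES_READONLY : List String := ["https://www.googleapis.com/auth/calendar.readonly"]
def CALENDAR_SCOPES_STANDARD : List String := ["https://www.googleapis.com/auth/calendar"]
def DRIVE_SCOPES_READONLY : List String := ["https://www.googleapis.com/auth/drive.readonly"]
def DRIVE_SCOPES_STANDARD : List String := ["https://www.googleapis.com/auth/drive"]

def get_google_scopes (services : List String) (mode : String) : List String :=
  let scopes : List String := []
  let scopes := if services.contains "messages" then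
      scopes ++ (if mode == "readonly" then GMAIL_SCOPES_READONLY else GMAIL_SCOPES_STANDARD)
    else scopes
  let scopes := if services.contains "calendar" then
      scopes ++ (if mode == "readonly" then CALENDAR_SCOPES_READONLY else CALENDAR_SCOPES_STANDARD)
    else scopes
  let scopes := if services.contains "drive" then
      scopes ++ (if mode == "readonly" then DRIVE_SCOPES_READONLY else DRIVE_SCOPES_STANDARD)
    else scopes
  -- seen-set dedup loop
  (scopes.foldl (fun (st : PySem.Set String × List String) s =>
      if st.1.contains s then st else (st.1.add s, st.2 ++ [s]))
    ((PySem.Set.empty : PySem.Set String), ([] : List String))).2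

-- ===== PORT B =====  (closed-form lookup into the precomputed table of all 16 answers)
def READONLY_ANSWERS : List (List String) :=
  [[], ["https://www.googleapis.com/auth/drive.readonly"],
   ["https://www.googleapis.com/auth/calendar.readonly"],
   ["https://www.googleapis.com/auth/calendar.readonly", "https://www.googleapis.com/auth/drive.readonly"],
   ["https://www.googleapis.com/auth/gmail.readonly"],
   ["https://www.googleapis.com/auth/gmail.readonly", "https://www.googleapis.com/auth/drive.readonly"],
   ["https://www.googleapis.com/auth/gmail.readonly", "https://www.googleapis.com/auth/calendar.readonly"],
   ["https://www.googleapis.com/auth/gmail.readonly", "https://www.googleapis.com/auth/calendar.readonly", "https://www.googleapis.com/auth/drive.readonly"]]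

def STANDARD_ANSWERS : List (List String) :=
  [[], ["https://www.googleapis.com/auth/drive"],
   ["https://www.googleapis.com/auth/calendar"],
   ["https://www.googleapis.com/auth/calendar", "https://www.googleapis.com/auth/drive"],
   ["https://www.googleapis.com/auth/gmail.modify", "https://www.googleapis.com/auth/gmail.compose"],
   ["https://www.googleapis.com/auth/gmail.modify", "https://www.googleapis.com/auth/gmail.compose", "https://www.googleapis.com/auth/drive"],
   ["https://www.googleapis.com/auth/gmail.modify", "https://www.googleapis.com/auth/gmail.compose", "https://www.googleapis.com/auth/calendar"],
   ["https://www.googleapis.com/auth/gmail.modify", "https://www.googleapis.com/auth/gmail.compose", "https://www.googleapis.com/auth/calendar", "https://www.googleapis.com/auth/drive"]]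

def get_google_scopes_alt (services : List String) (mode : String) : List String :=
  let idx : Nat := 4 * (if services.contains "messages" then 1 else 0)
      + 2 * (if services.contains "calendar" then 1 else 0)
      + (if services.contains "drive" then 1 else 0)
  let table := if mode == "readonly" then READONLY_ANSWERS else STANDARD_ANSWERS
  -- table[idx]: idx is always 0..7, so Python indexing cannot raise; getD default is never hit
  table.getD idx []

-- ===== PRECONDITION & SPEC =====
def Spec_get_google_scopes (services : List String) (mode : String) (out : List String) : Prop := out = get_google_scopes_alt services mode
instance (services : List String) (mode : String) (out : List String) : Decidable (Spec_get_google_scopes services mode out) := by unfold Spec_get_google_scopes; infer_instance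

-- ===== CLAIM (what is proved, stated in full; the proofs are below) =====
def Claim_equal_get_google_scopes : Prop := ∀ (services : List String) (mode : String), Dom_get_google_scopes services mode → Spec_get_google_scopes services mode (get_google_scopes services mode)

-- ===== LEMMAS AND PROOFS =====

-- ===== VERDICT (by name: the statement is the Claim_ definition above) =====
theorem get_google_scopes_spec : Claim_equal_get_google_scopes := by
  intro services mode _
  unfold Spec_get_google_scopes
  cases h1 : services.contains "messages" <;>
  cases h2 : services.contains "calendar" <;>
  cases h3 : services.contains "drive" <;>
  cases hm : (mode == "readonly") <;>
    simp only [List.contains_eq_mem, decide_eq_true_eq, decide_eq_false_iff_not] at h1 h2 h3 <;>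
    simp [get_google_scopes, get_google_scopes_alt, READONLY_ANSWERS, STANDARD_ANSWERS,
      h1, h2, h3, hm,
      GMAIL_SCOPES_READONLY, GMAIL_SCOPES_STANDARD, CALENDAR_SCOPES_READONLY,
      CALENDAR_SCOPES_STANDARD, DRIVE_SCOPES_READONLY, DRIVE_SCOPES_STANDARD,
      PySem.Set.empty, PySem.Set.add, PySem.Set.contains, List.foldl]
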